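-- pv_equiv track=rewrite | github.com/jackinf/aoc | 2023/day14/part2.py | calculate
-- ===== SOURCE A (Python) =====
-- def calculate(grid):
--     results = []
--     scores = []
--     for col in range(len(grid[0])):
--         results.append([])
--         scores.append([])
--
--         power = len(grid)
--         row_counter = 0
--         for row in range(len(grid)):
--             if grid[row][col] == 'O':
--                 results[-1].append((row_counter, 'O'))
--                 row_counter += 1
--
--                 scores[-1].append(power)
--                 power -= 1
--             if grid[row][col] == '#':
--                 results[-1].append((row, '#'))
--                 row_counter = row + 1
--
--                 power = len(grid) - row - 1
--     return results, scores
-- ===== SOURCE B (Python) =====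
-- def roll(cells, start, n):
--     # Emit the tuples/scores for the column suffix `cells`, whose first cell
--     # has global row index `start`, in a grid of n rows: take the segment up
--     # to the first wall, emit its rolled 'O' run, then the wall, then recurse.
--     if '#' in cells:
--         w = cells.index('#')
--         c = cells[:w].count('O')
--         r2, s2 = roll(cells[w + 1:], start + w + 1, n)
--         return ([(start + k, 'O') for k in range(c)] + [(start + w, '#')] + r2,
--                 [n - start - k for k in range(c)] + s2)
--     c = cells.count('O')
--     return ([(start + k, 'O') for k in range(c)],
--             [n - start - k for k in range(c)])
--
--
-- def calculate(grid):
--     n = len(grid)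
--     results = []
--     scores = []
--     for col in range(len(grid[0])):
--         column = [row[col] for row in grid]
--         res, sco = roll(column, 0, n)
--         results.append(res)
--         scores.append(sco)
--     return results, scores
-- ===== Notes on version B (the rewrite author's own statement) =====
-- stated objective: alternative
-- what changed: A sweeps every cell of a column with running row_counter/power counters; B splits each column at its '#' walls via index/slice, counts the 'O's per wall-free segment, and emits each segment's rolled run and scores by a range comprehension, recursing on the suffix after the wall.
import Mathlib
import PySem

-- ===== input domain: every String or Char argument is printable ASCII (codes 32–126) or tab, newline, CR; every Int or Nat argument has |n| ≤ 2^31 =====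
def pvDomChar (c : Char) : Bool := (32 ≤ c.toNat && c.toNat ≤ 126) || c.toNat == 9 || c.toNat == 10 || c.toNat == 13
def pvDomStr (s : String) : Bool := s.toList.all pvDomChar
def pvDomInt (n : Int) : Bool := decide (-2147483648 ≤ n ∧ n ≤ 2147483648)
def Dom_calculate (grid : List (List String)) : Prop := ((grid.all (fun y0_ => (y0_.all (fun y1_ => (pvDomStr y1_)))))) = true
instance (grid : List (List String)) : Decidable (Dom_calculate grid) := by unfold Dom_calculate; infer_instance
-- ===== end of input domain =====

-- B replaces A's per-cell row_counter/power counters by a recursive segment decomposition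
-- of each column at its '#' walls (objective: alternative decomposition, same cost).


-- ===== PORT A =====
def calculate (grid : List (List String)) : (List (List (Int × String))) × List (List Int) :=
  let n : Int := (grid.length : Int)
  -- for col in range(len(grid[0])):  (grid[0] raises on empty grid → Pre_)
  (PySem.List.pyRange 0 ((PySem.List.pyGetD grid 0 []).length : Int) 1).foldl
    (fun (acc : (List (List (Int × String))) × List (List Int)) col =>
      -- results.append([]); scores.append([]); power = len(grid); row_counter = 0;
      -- the inner loop mutates results[-1]/scores[-1], ported as the state (res, sco, rc, power)
      let st :=
        (PySem.List.pyRange 0 n 1).foldl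
          (fun (st : List (Int × String) × List Int × Int × Int) row =>
            match st with
            | (res, sco, rc, p) =>
              let cell := PySem.List.pyGetD (PySem.List.pyGetD grid row []) col ""
              let st1 := if cell == "O" then (res ++ [(rc, "O")], sco ++ [p], rc + 1, p - 1)
                         else (res, sco, rc, p)
              match st1 with
              | (res, sco, rc, p) =>
                if cell == "#" then (res ++ [(row, "#")], sco, row + 1, n - row - 1)
                else (res, sco, rc, p))
          (([] : List (Int × String)), ([] : List Int), (0 : Int), n)
      (acc.1 ++ [st.1], acc.2 ++ [st.2.1]))
    ([], [])

-- ===== PORT B =====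
-- roll(cells, start, n) of Source B; `'#' in cells` / `cells.index('#')` become the two cases of index?
def roll (cells : List String) (start n : Int) : List (Int × String) × List Int :=
  match h : PySem.List.index? cells "#" with
  | some w =>
      let c : Int := (PySem.List.count (PySem.List.slice cells (some 0) (some (w : Int))) "O" : Int)
      let rs := roll (PySem.List.slice cells (some ((w : Int) + 1)) none) (start + (w : Int) + 1) n
      ((PySem.List.pyRange 0 c 1).map (fun k => (start + k, "O")) ++ [(start + (w : Int), "#")] ++ rs.1,
       (PySem.List.pyRange 0 c 1).map (fun k => n - start - k) ++ rs.2)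
  | none =>
      let c : Int := (PySem.List.count cells "O" : Int)
      ((PySem.List.pyRange 0 c 1).map (fun k => (start + k, "O")),
       (PySem.List.pyRange 0 c 1).map (fun k => n - start - k))
termination_by cells.length
decreasing_by
  have hk := PySem.List.getElem_of_index?_eq_some h
  obtain ⟨hw, -, -⟩ := hk
  have : PySem.List.slice cells (some ((w : Int) + 1)) none = cells.drop (w + 1) := by
    have : ((w : Int) + 1) = ((w + 1 : Nat) : Int) := by push_cast; ring
    rw [this, PySem.List.slice_from_natCast]
  simp [this]
  omega

def calculate_alt (grid : List (List String)) : (List (List (Int × String))) × List (List Int) :=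
  let n : Int := (grid.length : Int)
  (PySem.List.pyRange 0 ((PySem.List.pyGetD grid 0 []).length : Int) 1).foldl
    (fun (acc : (List (List (Int × String))) × List (List Int)) col =>
      let column := grid.map (fun row => PySem.List.pyGetD row col "")
      let rs := roll column 0 n
      (acc.1 ++ [rs.1], acc.2 ++ [rs.2]))
    ([], [])

-- ===== PRECONDITION & SPEC =====
-- Pre_ excludes exactly the inputs where A raises: the empty grid (grid[0] → IndexError)
-- and grids with a row shorter than the first row (grid[row][col] → IndexError).
def Pre_calculate (grid : List (List String)) : Prop :=
  grid ≠ [] ∧ ∀ row ∈ grid, (grid.headD []).length ≤ row.length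
instance (grid : List (List String)) : Decidable (Pre_calculate grid) := by
  unfold Pre_calculate; infer_instance
def pvWitness_calculate : List (List String) := [["O", ".", "#"], ["#", "O", "O"]]

def Spec_calculate (grid : List (List String)) (out : (List (List (Int × String))) × List (List Int)) : Prop := out = calculate_alt grid
instance (grid : List (List String)) (out : (List (List (Int × String))) × List (List Int)) : Decidable (Spec_calculate grid out) := by unfold Spec_calculate; infer_instance

-- ===== CLAIM (what is proved, stated in full; the proofs are below) =====
def Claim_equal_calculate : Prop := ∀ (grid : List (List String)), Dom_calculate grid → Pre_calculate grid → Spec_calculate grid (calculate grid)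



-- ===== LEMMAS AND PROOFS =====

-- the inner-loop body of `calculate`, as a step function over (row, cell) pairs
def pvStep (n : Int) (st : List (Int × String) × List Int × Int × Int) (q : Int × String) :
    List (Int × String) × List Int × Int × Int :=
  match st with
  | (res, sco, rc, p) =>
    let st1 := if q.2 == "O" then (res ++ [(rc, "O")], sco ++ [p], rc + 1, p - 1)
               else (res, sco, rc, p)
    match st1 with
    | (res, sco, rc, p) =>
      if q.2 == "#" then (res ++ [(q.1, "#")], sco, q.1 + 1, n - q.1 - 1)
      else (res, sco, rc, p)

-- peel the first element off a range-comprehension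
lemma pvRangeSucc {β : Type} (c : Nat) (f : Nat → β) :
    (List.range (c + 1)).map f = f 0 :: (List.range c).map (fun k => f (k + 1)) := by
  rw [List.range_succ_eq_map, List.map_cons, List.map_map]
  rfl

-- over a wall-free segment, the inner loop emits exactly the rolled 'O' run
lemma pvSeg (n : Int) (seg : List String) (hw : "#" ∉ seg) :
    ∀ (i rc p : Int) (res : List (Int × String)) (sco : List Int),
    (PySem.List.enumerate seg i).foldl (pvStep n) (res, sco, rc, p) =
      (res ++ (List.range (seg.count "O")).map (fun (k : Nat) => (rc + (k : Int), "O")),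
       sco ++ (List.range (seg.count "O")).map (fun (k : Nat) => p - (k : Int)),
       rc + (seg.count "O" : Int), p - (seg.count "O" : Int)) := by
  induction seg with
  | nil => intro i rc p res sco; simp [PySem.List.enumerate]
  | cons c seg ih =>
    intro i rc p res sco
    have hc : c ≠ "#" := fun h => hw (h ▸ List.mem_cons_self)
    have hw' : "#" ∉ seg := fun h => hw (List.mem_cons_of_mem _ h)
    rw [PySem.List.enumerate_cons]
    by_cases hO : c = "O"
    · subst hO
      have hstep : pvStep n (res, sco, rc, p) (i, "O")
          = (res ++ [(rc, "O")], sco ++ [p], rc + 1, p - 1) := by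
        simp [pvStep]
      have hcount : ("O" :: seg).count "O" = seg.count "O" + 1 := by
        simp
      rw [List.foldl_cons, hstep, ih hw', hcount, pvRangeSucc, pvRangeSucc]
      simp only [Prod.mk.injEq]
      refine ⟨?_, ?_, by push_cast; ring, by push_cast; ring⟩
      · rw [List.append_assoc, List.singleton_append]
        congr 1
        congr 1
        · simp
        · refine (List.map_congr_left (fun k _ => ?_)).symm
          simp only [Prod.mk.injEq]
          refine ⟨by push_cast; ring, by trivial⟩
      · rw [List.append_assoc, List.singleton_append]
        congr 1
        congr 1
        · simp
        · refine (List.map_congr_left (fun k _ => ?_)).symm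
          push_cast; ring
    · have hstep : pvStep n (res, sco, rc, p) (i, c) = (res, sco, rc, p) := by
        simp [pvStep, hO, hc]
      have hcount : (c :: seg).count "O" = seg.count "O" := by
        simp [hO]
      rw [List.foldl_cons, hstep, ih hw', hcount]

-- bridge: a Python `range(c)` comprehension is a `List.range` map
lemma pvRangeMap {β : Type} (c : Nat) (f : Int → β) :
    (PySem.List.pyRange 0 (c : Int) 1).map f = (List.range c).map (fun (k : Nat) => f (k : Int)) := by
  rw [PySem.List.pyRange_one, List.map_map]
  have hc : (((c : Int)) - 0).toNat = c := by omega
  rw [hc]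
  exact List.map_congr_left (fun k _ => by simp [Function.comp])

-- the inner loop over a whole column equals B's segment recursion `roll`
lemma pvRoll (n : Int) : ∀ (N : Nat) (cells : List String), cells.length ≤ N →
    ∀ (s : Int) (res : List (Int × String)) (sco : List Int),
    ∃ rc, (PySem.List.enumerate cells s).foldl (pvStep n) (res, sco, s, n - s) =
      (res ++ (roll cells s n).1, sco ++ (roll cells s n).2, rc, n - rc) := by
  intro N
  induction N with
  | zero =>
    intro cells hlen s res sco
    have : cells = [] := List.eq_nil_of_length_eq_zero (Nat.le_zero.mp hlen)
    subst this
    refine ⟨s, ?_⟩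
    have hidx : PySem.List.index? ([] : List String) "#" = none := by
      exact (PySem.List.index?_eq_none_iff [] "#").mpr (by simp)
    rw [roll, hidx]
    simp [PySem.List.enumerate, PySem.List.count_eq]
  | succ N ih =>
    intro cells hlen s res sco
    cases hidx : PySem.List.index? cells "#" with
    | none =>
      have hnot : "#" ∉ cells := (PySem.List.index?_eq_none_iff cells "#").mp hidx
      refine ⟨s + (cells.count "O" : Int), ?_⟩
      rw [roll, hidx, pvSeg n cells hnot s s (n - s) res sco]
      simp only [PySem.List.count_eq, pvRangeMap, Prod.mk.injEq]
      exact ⟨trivial, trivial, trivial, by ring⟩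
    | some w =>
      obtain ⟨pre, suf, hcells, hpre, hnot⟩ := (PySem.List.index?_eq_some_iff cells "#" w).mp hidx
      subst hcells
      have hslice0 : PySem.List.slice (pre ++ "#" :: suf) (some 0) (some (w : Int)) = pre := by
        rw [PySem.List.slice_zero_start, PySem.List.slice_to_natCast, ← hpre, List.take_left]
      have hslice1 : PySem.List.slice (pre ++ "#" :: suf) (some ((w : Int) + 1)) none = suf := by
        have h1 : ((w : Int) + 1) = ((w + 1 : Nat) : Int) := by push_cast; ring
        have h2 : pre ++ "#" :: suf = (pre ++ ["#"]) ++ suf := by simp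
        have h3 : (pre ++ ["#"]).length = w + 1 := by simp [hpre]
        rw [h1, PySem.List.slice_from_natCast, h2, ← h3, List.drop_left]
      have hsuf : suf.length ≤ N := by
        have := hlen; simp at this; omega
      obtain ⟨rc, hrc⟩ := ih suf hsuf (s + (w : Int) + 1)
        (res ++ (List.range (pre.count "O")).map (fun (k : Nat) => (s + (k : Int), "O")) ++ [(s + (w : Int), "#")])
        (sco ++ (List.range (pre.count "O")).map (fun (k : Nat) => n - s - (k : Int)))
      refine ⟨rc, ?_⟩
      rw [PySem.List.enumerate_append, PySem.List.enumerate_cons, List.foldl_append,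
        pvSeg n pre hnot s s (n - s) res sco, List.foldl_cons]
      have hstep : pvStep n
          (res ++ (List.range (pre.count "O")).map (fun (k : Nat) => (s + (k : Int), "O")),
           sco ++ (List.range (pre.count "O")).map (fun (k : Nat) => n - s - (k : Int)),
           s + (pre.count "O" : Int), n - s - (pre.count "O" : Int))
          (s + (pre.length : Int), "#")
          = (res ++ (List.range (pre.count "O")).map (fun (k : Nat) => (s + (k : Int), "O")) ++ [(s + (pre.length : Int), "#")],
             sco ++ (List.range (pre.count "O")).map (fun (k : Nat) => n - s - (k : Int)),
             s + (pre.length : Int) + 1, n - (s + (pre.length : Int)) - 1) := by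
        simp [pvStep]
      rw [hstep, hpre]
      have harith : n - (s + (w : Int)) - 1 = n - (s + (w : Int) + 1) := by ring
      rw [harith, hrc]
      conv_rhs => rw [roll, hidx]
      simp [hslice0, hslice1, PySem.List.count_eq, pvRangeMap, List.append_assoc]

-- per column: A's inner loop result projects to B's roll of that column
lemma pvCol (grid : List (List String)) (col : Int) :
    ((PySem.List.pyRange 0 ((grid.length : Int)) 1).foldl
      (fun (st : List (Int × String) × List Int × Int × Int) row =>
        match st with
        | (res, sco, rc, p) =>
          let cell := PySem.List.pyGetD (PySem.List.pyGetD grid row []) col ""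
          let st1 := if cell == "O" then (res ++ [(rc, "O")], sco ++ [p], rc + 1, p - 1)
                     else (res, sco, rc, p)
          match st1 with
          | (res, sco, rc, p) =>
            if cell == "#" then (res ++ [(row, "#")], sco, row + 1, (grid.length : Int) - row - 1)
            else (res, sco, rc, p))
      (([] : List (Int × String)), ([] : List Int), (0 : Int), (grid.length : Int)))
    = let column := grid.map (fun row => PySem.List.pyGetD row col "")
      let rs := roll column 0 (grid.length : Int)
      (rs.1, rs.2,
       ((PySem.List.enumerate column 0).foldl (pvStep (grid.length : Int)) ([], [], 0, (grid.length : Int))).2.2.1,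
       ((PySem.List.enumerate column 0).foldl (pvStep (grid.length : Int)) ([], [], 0, (grid.length : Int))).2.2.2) := by
  set n : Int := (grid.length : Int) with hn
  set column : List String := grid.map (fun row => PySem.List.pyGetD row col "") with hcol
  have hget : ∀ row : Int, PySem.List.pyGetD (PySem.List.pyGetD grid row []) col ""
      = PySem.List.pyGetD column row "" := by
    intro row
    have h0 : PySem.List.pyGetD ([] : List String) col "" = "" := by
      simp [PySem.List.pyGetD, PySem.List.pyGet?, PySem.List.pyIdx?]
    have h1 := PySem.List.pyGetD_map (fun r => PySem.List.pyGetD r col "") grid row []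
    rw [h0] at h1
    rw [← hcol] at h1
    exact h1.symm
  have hlambda : (fun (st : List (Int × String) × List Int × Int × Int) (row : Int) =>
      match st with
      | (res, sco, rc, p) =>
        let cell := PySem.List.pyGetD (PySem.List.pyGetD grid row []) col ""
        let st1 := if cell == "O" then (res ++ [(rc, "O")], sco ++ [p], rc + 1, p - 1)
                   else (res, sco, rc, p)
        match st1 with
        | (res, sco, rc, p) =>
          if cell == "#" then (res ++ [(row, "#")], sco, row + 1, n - row - 1)
          else (res, sco, rc, p))
      = (fun st row => pvStep n st (row, PySem.List.pyGetD column row "")) := by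
    funext st row
    obtain ⟨res, sco, rc, p⟩ := st
    simp only [pvStep, hget row]
  rw [hlambda]
  have hfold : (PySem.List.pyRange 0 n 1).foldl
      (fun st row => pvStep n st (row, PySem.List.pyGetD column row ""))
      ([], [], 0, n)
      = (PySem.List.enumerate column 0).foldl (pvStep n) ([], [], 0, n) := by
    have hlen : n = (column.length : Int) := by simp [hcol, hn]
    rw [PySem.List.enumerate_eq_map_pyRange column "", List.foldl_map]
    rw [hlen]
    rfl
  rw [hfold]
  obtain ⟨rc, hrc⟩ := pvRoll n column.length column (le_refl _) 0 [] []
  have h0 : n - 0 = n := by ring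
  rw [h0] at hrc
  simp [hrc]

-- ===== VERDICT (by name: the statement is the Claim_ definition above) =====
theorem calculate_spec : Claim_equal_calculate := by
  intro grid _ _
  show calculate grid = calculate_alt grid
  unfold calculate calculate_alt
  apply PySem.List.foldl_congr_mem
  intro acc col _
  have h := pvCol grid col
  simp only [h]
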